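-- pv_equiv track=rewrite | github.com/Paulndambo/INSURANCE-SAAS-APP | apps/sales/get_dependent_types.py | get_relation_type
-- ===== SOURCE A (Python) =====
-- child_types = ['Son', 'Daughter', 'Child']
--
-- parent_in_law_types = ['Parent In-Law', 'Mother in law', 'Father in law']
--
-- sibling_in_laws_types = ['Sibling In-Law', 'Brother in law', 'Brother-in-law', 'Sister in law', 'Son in law', 'Daughter in law']
--
-- grandparent_types = ['Grandparent', 'Grandfather', 'Grandmother']
--
-- grandchildren_types = ['Grandchild', 'Granddaughter', 'Grandson']
--
-- sibling_types = ['Sibling', 'Brother', 'Sister']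
--
-- cousin_types = ['Cousin', 'cousin', 'COUSIN']
--
-- spouse_types = ['Spouse', 'Partner', 'Wife', 'Husband']
--
-- father_types = ['father', 'Step father', 'Step-Father']
--
-- mother_types = ['Mother', 'Step Mother', 'Step-Mother']
--
-- def get_relation_type(dependent_type: str):
--     relation_type = ''
--     if dependent_type.lower() in [x.lower() for x in child_types]:
--         relation_type = 'child'
--     elif dependent_type.lower() in [x.lower() for x in parent_in_law_types]:
--         relation_type = 'parent_in_law'
--     elif dependent_type.lower() in [x.lower() for x in sibling_in_laws_types]:
--         relation_type = 'sibling_in_law'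
--     elif dependent_type.lower() in [x.lower() for x in grandparent_types]:
--         relation_type = 'grandparent'
--     elif dependent_type.lower() in [x.lower() for x in grandchildren_types]:
--         relation_type = 'grandchild'
--     elif dependent_type.lower() in [x.lower() for x in sibling_types]:
--         relation_type = 'sibling'
--     elif dependent_type.lower() in [x.lower() for x in cousin_types]:
--         relation_type = 'cousin'
--     elif dependent_type.lower() in [x.lower()  for x in spouse_types]:
--         relation_type = 'spouse'
--     elif dependent_type.lower() in [x.lower() for x in father_types]:
--         relation_type = 'parent'
--     elif dependent_type.lower() in [x.lower() for x in mother_types]: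
--         relation_type = 'parent'
--     elif dependent_type == 'Adult Child':
--         relation_type = 'adult_child'
--     elif dependent_type == 'Minor Child':
--         relation_type = 'minor_child'
--     elif dependent_type == 'Senior Citizen Parent':
--         relation_type = 'senior_citizen_parent'
--     else:
--         relation_type = dependent_type.lower()
--
--     return relation_type
-- ===== SOURCE B (Python) =====
-- # Morphological classifier: strip the in-law suffix or the grand/step
-- # prefix and classify the remaining base word, instead of membership tests over ten lists.
-- def _classify(key):
--     if key.endswith(' in law'):
--         if key[:-7] in ('mother', 'father'):
--             return 'parent_in_law'
--         if key[:-7] in ('brother', 'sister', 'son', 'daughter'):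
--             return 'sibling_in_law'
--     elif key == 'parent in-law':
--         return 'parent_in_law'
--     elif key in ('sibling in-law', 'brother-in-law'):
--         return 'sibling_in_law'
--     elif key.startswith('grand'):
--         if key[5:] in ('parent', 'father', 'mother'):
--             return 'grandparent'
--         if key[5:] in ('child', 'daughter', 'son'):
--             return 'grandchild'
--     elif key.startswith('step ') or key.startswith('step-'):
--         if key[5:] in ('father', 'mother'):
--             return 'parent'
--     elif key in ('son', 'daughter', 'child'):
--         return 'child'
--     elif key in ('sibling', 'brother', 'sister'):
--         return 'sibling'
--     elif key == 'cousin':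
--         return 'cousin'
--     elif key in ('spouse', 'partner', 'wife', 'husband'):
--         return 'spouse'
--     elif key in ('father', 'mother'):
--         return 'parent'
--     return None
--
-- def get_relation_type(dependent_type: str):
--     key = dependent_type.lower()
--     cat = _classify(key)
--     if cat is not None:
--         return cat
--     if dependent_type in ('Adult Child', 'Minor Child', 'Senior Citizen Parent'):
--         return dependent_type.replace(' ', '_').lower()
--     return key
-- ===== Notes on version B (the rewrite author's own statement) =====
-- stated objective: alternative
-- what changed: Replaces A's ten sequential membership tests over lowercased relation lists by a morphological classifier that strips the in-law suffix or the grand/step prefix and classifies the remaining base word, deriving the three case-sensitive outputs by replace-and-lower instead of literal results.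
import Mathlib
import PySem

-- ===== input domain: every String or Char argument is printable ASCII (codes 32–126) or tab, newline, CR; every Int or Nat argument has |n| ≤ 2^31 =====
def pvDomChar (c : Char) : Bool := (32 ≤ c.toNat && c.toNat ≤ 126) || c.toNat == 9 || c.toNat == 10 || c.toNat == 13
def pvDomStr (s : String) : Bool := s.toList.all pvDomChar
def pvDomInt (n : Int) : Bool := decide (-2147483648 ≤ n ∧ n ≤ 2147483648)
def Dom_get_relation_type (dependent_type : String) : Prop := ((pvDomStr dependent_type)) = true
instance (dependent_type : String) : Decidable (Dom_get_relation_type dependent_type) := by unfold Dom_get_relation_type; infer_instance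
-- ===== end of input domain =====

-- B replaces A's ten membership tests over lowercased lists by a morphological
-- classifier that strips the in-law suffix or the grand/step prefix and classifies the base word (alternative).

-- ===== PORT A =====
def child_types : List String := ["Son", "Daughter", "Child"]
def parent_in_law_types : List String := ["Parent In-Law", "Mother in law", "Father in law"]
def sibling_in_laws_types : List String := ["Sibling In-Law", "Brother in law", "Brother-in-law", "Sister in law", "Son in law", "Daughter in law"]
def grandparent_types : List String := ["Grandparent", "Grandfather", "Grandmother"]
def grandchildren_types : List String := ["Grandchild", "Granddaughter", "Grandson"]
def sibling_types : List String := ["Sibling", "Brother", "Sister"]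
def cousin_types : List String := ["Cousin", "cousin", "COUSIN"]
def spouse_types : List String := ["Spouse", "Partner", "Wife", "Husband"]
def father_types : List String := ["father", "Step father", "Step-Father"]
def mother_types : List String := ["Mother", "Step Mother", "Step-Mother"]

def get_relation_type (dependent_type : String) : String :=
  if PySem.Str.lower dependent_type ∈ child_types.map PySem.Str.lower then "child"
  else if PySem.Str.lower dependent_type ∈ parent_in_law_types.map PySem.Str.lower then "parent_in_law"
  else if PySem.Str.lower dependent_type ∈ sibling_in_laws_types.map PySem.Str.lower then "sibling_in_law"
  else if PySem.Str.lower dependent_type ∈ grandparent_types.map PySem.Str.lower then "grandparent"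
  else if PySem.Str.lower dependent_type ∈ grandchildren_types.map PySem.Str.lower then "grandchild"
  else if PySem.Str.lower dependent_type ∈ sibling_types.map PySem.Str.lower then "sibling"
  else if PySem.Str.lower dependent_type ∈ cousin_types.map PySem.Str.lower then "cousin"
  else if PySem.Str.lower dependent_type ∈ spouse_types.map PySem.Str.lower then "spouse"
  else if PySem.Str.lower dependent_type ∈ father_types.map PySem.Str.lower then "parent"
  else if PySem.Str.lower dependent_type ∈ mother_types.map PySem.Str.lower then "parent"
  else if dependent_type = "Adult Child" then "adult_child"
  else if dependent_type = "Minor Child" then "minor_child"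
  else if dependent_type = "Senior Citizen Parent" then "senior_citizen_parent"
  else PySem.Str.lower dependent_type

-- ===== PORT B =====
-- helper _classify of Source B; key[:-7] / key[5:] are PySem.Str.slice (exact Python slices)
def classify (key : String) : Option String :=
  if PySem.Str.endswith key " in law" then
    if PySem.Str.slice key none (some (-7)) = "mother" ∨ PySem.Str.slice key none (some (-7)) = "father" then some "parent_in_law"
    else if PySem.Str.slice key none (some (-7)) = "brother" ∨ PySem.Str.slice key none (some (-7)) = "sister" ∨ PySem.Str.slice key none (some (-7)) = "son" ∨ PySem.Str.slice key none (some (-7)) = "daughter" then some "sibling_in_law"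
    else none
  else if key = "parent in-law" then some "parent_in_law"
  else if key = "sibling in-law" ∨ key = "brother-in-law" then some "sibling_in_law"
  else if PySem.Str.startswith key "grand" then
    if PySem.Str.slice key (some 5) none = "parent" ∨ PySem.Str.slice key (some 5) none = "father" ∨ PySem.Str.slice key (some 5) none = "mother" then some "grandparent"
    else if PySem.Str.slice key (some 5) none = "child" ∨ PySem.Str.slice key (some 5) none = "daughter" ∨ PySem.Str.slice key (some 5) none = "son" then some "grandchild"
    else none
  else if PySem.Str.startswith key "step " || PySem.Str.startswith key "step-" then
    if PySem.Str.slice key (some 5) none = "father" ∨ PySem.Str.slice key (some 5) none = "mother" then some "parent"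
    else none
  else if key = "son" ∨ key = "daughter" ∨ key = "child" then some "child"
  else if key = "sibling" ∨ key = "brother" ∨ key = "sister" then some "sibling"
  else if key = "cousin" then some "cousin"
  else if key = "spouse" ∨ key = "partner" ∨ key = "wife" ∨ key = "husband" then some "spouse"
  else if key = "father" ∨ key = "mother" then some "parent"
  else none

def get_relation_type_alt (dependent_type : String) : String :=
  let key := PySem.Str.lower dependent_type
  match classify key with
  | some cat => cat
  | none =>
    if dependent_type = "Adult Child" ∨ dependent_type = "Minor Child" ∨ dependent_type = "Senior Citizen Parent" then
      PySem.Str.lower (PySem.Str.replace dependent_type " " "_")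
    else key

-- ===== PRECONDITION & SPEC =====
def Spec_get_relation_type (dependent_type : String) (out : String) : Prop := out = get_relation_type_alt dependent_type
instance (dependent_type : String) (out : String) : Decidable (Spec_get_relation_type dependent_type out) := by unfold Spec_get_relation_type; infer_instance

-- ===== CLAIM (what is proved, stated in full; the proofs are below) =====
def Claim_equal_get_relation_type : Prop := ∀ (dependent_type : String), Dom_get_relation_type dependent_type → Spec_get_relation_type dependent_type (get_relation_type dependent_type)

-- ===== LEMMAS AND PROOFS =====
-- the 32 lowercased keys A's ten lists recognise
def keys32 : List String := ["son", "daughter", "child", "parent in-law", "mother in law", "father in law", "sibling in-law", "brother in law", "brother-in-law", "sister in law", "son in law", "daughter in law", "grandparent", "grandfather", "grandmother", "grandchild", "granddaughter", "grandson", "sibling", "brother", "sister", "cousin", "spouse", "partner", "wife", "husband", "father", "step father", "step-father", "mother", "step mother", "step-mother"]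

-- A's body with the lowered argument abstracted (defeq to the port)
def aCore (k s : String) : String :=
  if k ∈ child_types.map PySem.Str.lower then "child"
  else if k ∈ parent_in_law_types.map PySem.Str.lower then "parent_in_law"
  else if k ∈ sibling_in_laws_types.map PySem.Str.lower then "sibling_in_law"
  else if k ∈ grandparent_types.map PySem.Str.lower then "grandparent"
  else if k ∈ grandchildren_types.map PySem.Str.lower then "grandchild"
  else if k ∈ sibling_types.map PySem.Str.lower then "sibling"
  else if k ∈ cousin_types.map PySem.Str.lower then "cousin"
  else if k ∈ spouse_types.map PySem.Str.lower then "spouse"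
  else if k ∈ father_types.map PySem.Str.lower then "parent"
  else if k ∈ mother_types.map PySem.Str.lower then "parent"
  else if s = "Adult Child" then "adult_child"
  else if s = "Minor Child" then "minor_child"
  else if s = "Senior Citizen Parent" then "senior_citizen_parent"
  else k

-- B's body with the lowered argument abstracted (defeq to the port)
def bCore (k s : String) : String :=
  match classify k with
  | some cat => cat
  | none =>
    if s = "Adult Child" ∨ s = "Minor Child" ∨ s = "Senior Citizen Parent" then
      PySem.Str.lower (PySem.Str.replace s " " "_")
    else k

theorem aEq (s : String) : get_relation_type s = aCore (PySem.Str.lower s) s := rfl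
theorem bEq (s : String) : get_relation_type_alt s = bCore (PySem.Str.lower s) s := rfl

theorem eq_of_suffix (k b w : String) (hE : PySem.Str.endswith k " in law" = true)
    (hb : PySem.Str.slice k none (some (-7)) = b)
    (hw : b.toList ++ (" in law").toList = w.toList) : k = w := by
  obtain ⟨p, hp⟩ : (" in law").toList <:+ k.toList := by
    simp only [PySem.Str.endswith_eq] at hE
    exact (PySem.Chars.endswith_iff _ _).mp hE
  have hbl : k.toList.take (k.toList.length - 7) = b.toList := by
    have h2 := congrArg String.toList hb
    simpa [pysem] using h2
  have hsl : (" in law").toList.length = 7 := by decide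
  have hlen : k.toList.length = p.length + 7 := by
    rw [← hp, List.length_append, hsl]
  have hpb : p = b.toList := by
    rw [← hbl, hlen, Nat.add_sub_cancel, ← hp, List.take_left]
  apply String.toList_inj.mp
  rw [← hp, hpb, hw]

theorem eq_of_prefix (k p r w : String) (hp5 : p.toList.length = 5)
    (hS : PySem.Str.startswith k p = true)
    (hr : PySem.Str.slice k (some 5) none = r)
    (hw : p.toList ++ r.toList = w.toList) : k = w := by
  obtain ⟨t, ht⟩ : p.toList <+: k.toList := by
    simp only [PySem.Str.startswith_eq] at hS
    exact (PySem.Chars.startswith_iff _ _).mp hS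
  have hrl : k.toList.drop 5 = r.toList := by
    have h2 := congrArg String.toList hr
    simpa [pysem] using h2
  have htr : t = r.toList := by
    rw [← hrl, ← ht, ← hp5, List.drop_left]
  apply String.toList_inj.mp
  rw [← ht, htr, hw]

theorem classify_none (k : String) (hk : k ∉ keys32) : classify k = none := by
  simp only [keys32, List.mem_cons, List.not_mem_nil, or_false, not_or] at hk
  obtain ⟨n01, n02, n03, n04, n05, n06, n07, n08, n09, n10, n11, n12, n13, n14, n15, n16, n17, n18, n19, n20, n21, n22, n23, n24, n25, n26, n27, n28, n29, n30, n31, n32⟩ := hk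
  unfold classify
  by_cases hE : PySem.Str.endswith k " in law" = true
  · rw [if_pos hE]
    by_cases c1 : PySem.Str.slice k none (some (-7)) = "mother" ∨ PySem.Str.slice k none (some (-7)) = "father"
    · exfalso
      rcases c1 with h | h
      · exact n05 (eq_of_suffix k "mother" "mother in law" hE h (by decide))
      · exact n06 (eq_of_suffix k "father" "father in law" hE h (by decide))
    · rw [if_neg c1]
      by_cases c2 : PySem.Str.slice k none (some (-7)) = "brother" ∨ PySem.Str.slice k none (some (-7)) = "sister" ∨ PySem.Str.slice k none (some (-7)) = "son" ∨ PySem.Str.slice k none (some (-7)) = "daughter"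
      · exfalso
        rcases c2 with h | h | h | h
        · exact n08 (eq_of_suffix k "brother" "brother in law" hE h (by decide))
        · exact n10 (eq_of_suffix k "sister" "sister in law" hE h (by decide))
        · exact n11 (eq_of_suffix k "son" "son in law" hE h (by decide))
        · exact n12 (eq_of_suffix k "daughter" "daughter in law" hE h (by decide))
      · rw [if_neg c2]
  · rw [if_neg hE]
    rw [if_neg n04]
    rw [if_neg (by tauto : ¬(k = "sibling in-law" ∨ k = "brother-in-law"))]
    by_cases hG : PySem.Str.startswith k "grand" = true
    · rw [if_pos hG]
      by_cases c3 : PySem.Str.slice k (some 5) none = "parent" ∨ PySem.Str.slice k (some 5) none = "father" ∨ PySem.Str.slice k (some 5) none = "mother"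
      · exfalso
        rcases c3 with h | h | h
        · exact n13 (eq_of_prefix k "grand" "parent" "grandparent" (by decide) hG h (by decide))
        · exact n14 (eq_of_prefix k "grand" "father" "grandfather" (by decide) hG h (by decide))
        · exact n15 (eq_of_prefix k "grand" "mother" "grandmother" (by decide) hG h (by decide))
      · rw [if_neg c3]
        by_cases c4 : PySem.Str.slice k (some 5) none = "child" ∨ PySem.Str.slice k (some 5) none = "daughter" ∨ PySem.Str.slice k (some 5) none = "son"
        · exfalso
          rcases c4 with h | h | h
          · exact n16 (eq_of_prefix k "grand" "child" "grandchild" (by decide) hG h (by decide))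
          · exact n17 (eq_of_prefix k "grand" "daughter" "granddaughter" (by decide) hG h (by decide))
          · exact n18 (eq_of_prefix k "grand" "son" "grandson" (by decide) hG h (by decide))
        · rw [if_neg c4]
    · rw [if_neg hG]
      by_cases hS : (PySem.Str.startswith k "step " || PySem.Str.startswith k "step-") = true
      · rw [if_pos hS]
        by_cases c5 : PySem.Str.slice k (some 5) none = "father" ∨ PySem.Str.slice k (some 5) none = "mother"
        · exfalso
          rcases Bool.or_eq_true _ _ ▸ hS with s1 | s2
          · rcases c5 with h | h
            · exact n28 (eq_of_prefix k "step " "father" "step father" (by decide) s1 h (by decide))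
            · exact n31 (eq_of_prefix k "step " "mother" "step mother" (by decide) s1 h (by decide))
          · rcases c5 with h | h
            · exact n29 (eq_of_prefix k "step-" "father" "step-father" (by decide) s2 h (by decide))
            · exact n32 (eq_of_prefix k "step-" "mother" "step-mother" (by decide) s2 h (by decide))
        · rw [if_neg c5]
      · rw [if_neg hS]
        rw [if_neg (by tauto : ¬(k = "son" ∨ k = "daughter" ∨ k = "child"))]
        rw [if_neg (by tauto : ¬(k = "sibling" ∨ k = "brother" ∨ k = "sister"))]
        rw [if_neg n22]
        rw [if_neg (by tauto : ¬(k = "spouse" ∨ k = "partner" ∨ k = "wife" ∨ k = "husband"))]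
        rw [if_neg (by tauto : ¬(k = "father" ∨ k = "mother"))]

-- case: the lowered input is one of the 32 recognised keys — both cores compute the same category
set_option maxHeartbeats 3000000 in
theorem core_eq_of_mem (s : String) (hk : PySem.Str.lower s ∈ keys32) :
    aCore (PySem.Str.lower s) s = bCore (PySem.Str.lower s) s := by
  simp only [keys32, List.mem_cons, List.not_mem_nil, or_false] at hk
  rcases hk with h|h|h|h|h|h|h|h|h|h|h|h|h|h|h|h|h|h|h|h|h|h|h|h|h|h|h|h|h|h|h|h <;> rw [h] <;> rfl

-- literal computations for the three case-sensitive labels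
theorem adultLit : PySem.Str.lower (PySem.Str.replace "Adult Child" " " "_") = "adult_child" := by decide
theorem minorLit : PySem.Str.lower (PySem.Str.replace "Minor Child" " " "_") = "minor_child" := by decide
theorem seniorLit : PySem.Str.lower (PySem.Str.replace "Senior Citizen Parent" " " "_") = "senior_citizen_parent" := by decide

-- A falls through all ten membership tests to its exact-match tail
theorem aCore_tail (k s : String)
    (h1 : k ∉ child_types.map PySem.Str.lower)
    (h2 : k ∉ parent_in_law_types.map PySem.Str.lower)
    (h3 : k ∉ sibling_in_laws_types.map PySem.Str.lower)
    (h4 : k ∉ grandparent_types.map PySem.Str.lower)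
    (h5 : k ∉ grandchildren_types.map PySem.Str.lower)
    (h6 : k ∉ sibling_types.map PySem.Str.lower)
    (h7 : k ∉ cousin_types.map PySem.Str.lower)
    (h8 : k ∉ spouse_types.map PySem.Str.lower)
    (h9 : k ∉ father_types.map PySem.Str.lower)
    (h10 : k ∉ mother_types.map PySem.Str.lower) :
    aCore k s = if s = "Adult Child" then "adult_child" else if s = "Minor Child" then "minor_child" else if s = "Senior Citizen Parent" then "senior_citizen_parent" else k := by
  unfold aCore
  rw [if_neg h1, if_neg h2, if_neg h3, if_neg h4, if_neg h5, if_neg h6, if_neg h7, if_neg h8, if_neg h9, if_neg h10]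

-- B with no category falls through to the same exact-match tail
theorem bCore_tail (k s : String) (hcl : classify k = none) :
    bCore k s = if s = "Adult Child" then "adult_child" else if s = "Minor Child" then "minor_child" else if s = "Senior Citizen Parent" then "senior_citizen_parent" else k := by
  unfold bCore
  rw [hcl]
  show (if s = "Adult Child" ∨ s = "Minor Child" ∨ s = "Senior Citizen Parent" then PySem.Str.lower (PySem.Str.replace s " " "_") else k) = _
  by_cases t1 : s = "Adult Child"
  · subst t1
    rw [if_pos (Or.inl rfl), if_pos rfl]
    exact adultLit
  · by_cases t2 : s = "Minor Child"
    · subst t2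
      rw [if_pos (Or.inr (Or.inl rfl)), if_neg t1, if_pos rfl]
      exact minorLit
    · by_cases t3 : s = "Senior Citizen Parent"
      · subst t3
        rw [if_pos (Or.inr (Or.inr rfl)), if_neg t1, if_neg t2, if_pos rfl]
        exact seniorLit
      · rw [if_neg (by tauto : ¬(s = "Adult Child" ∨ s = "Minor Child" ∨ s = "Senior Citizen Parent")), if_neg t1, if_neg t2, if_neg t3]

-- case: the lowered input is none of the 32 keys — both fall through to the exact-match tail
set_option maxHeartbeats 3000000 in
theorem core_eq_of_not_mem (s : String) (hk : PySem.Str.lower s ∉ keys32) :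
    aCore (PySem.Str.lower s) s = bCore (PySem.Str.lower s) s := by
  have hcl := classify_none _ hk
  simp only [keys32, List.mem_cons, List.not_mem_nil, or_false, not_or] at hk
  obtain ⟨n01, n02, n03, n04, n05, n06, n07, n08, n09, n10, n11, n12, n13, n14, n15, n16, n17, n18, n19, n20, n21, n22, n23, n24, n25, n26, n27, n28, n29, n30, n31, n32⟩ := hk
  have e1 : child_types.map PySem.Str.lower = ["son", "daughter", "child"] := rfl
  have e2 : parent_in_law_types.map PySem.Str.lower = ["parent in-law", "mother in law", "father in law"] := rfl
  have e3 : sibling_in_laws_types.map PySem.Str.lower = ["sibling in-law", "brother in law", "brother-in-law", "sister in law", "son in law", "daughter in law"] := rfl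
  have e4 : grandparent_types.map PySem.Str.lower = ["grandparent", "grandfather", "grandmother"] := rfl
  have e5 : grandchildren_types.map PySem.Str.lower = ["grandchild", "granddaughter", "grandson"] := rfl
  have e6 : sibling_types.map PySem.Str.lower = ["sibling", "brother", "sister"] := rfl
  have e7 : cousin_types.map PySem.Str.lower = ["cousin", "cousin", "cousin"] := rfl
  have e8 : spouse_types.map PySem.Str.lower = ["spouse", "partner", "wife", "husband"] := rfl
  have e9 : father_types.map PySem.Str.lower = ["father", "step father", "step-father"] := rfl
  have e10 : mother_types.map PySem.Str.lower = ["mother", "step mother", "step-mother"] := rfl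
  rw [aCore_tail _ s (by rw [e1]; simp [n01, n02, n03]) (by rw [e2]; simp [n04, n05, n06])
        (by rw [e3]; simp [n07, n08, n09, n10, n11, n12]) (by rw [e4]; simp [n13, n14, n15])
        (by rw [e5]; simp [n16, n17, n18]) (by rw [e6]; simp [n19, n20, n21])
        (by rw [e7]; simp [n22]) (by rw [e8]; simp [n23, n24, n25, n26])
        (by rw [e9]; simp [n27, n28, n29]) (by rw [e10]; simp [n30, n31, n32]),
      bCore_tail _ s hcl]

-- ===== VERDICT (by name: the statement is the Claim_ definition above) =====
theorem get_relation_type_spec : Claim_equal_get_relation_type := by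
  intro s _
  unfold Spec_get_relation_type
  rw [aEq, bEq]
  by_cases hk : PySem.Str.lower s ∈ keys32
  · exact core_eq_of_mem s hk
  · exact core_eq_of_not_mem s hk
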